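-- pv_equiv track=rewrite | github.com/raphy0316/basketball-form-analyzer | shooting_comparison/dtw_analysis/dtw_feature_extractor.py | _organize_frames_by_phase
-- ===== SOURCE A (Python) =====
-- from typing import Dict, List, Tuple, Optional
--
-- def _organize_frames_by_phase(frames: List[Dict]) -> Dict[str, List[Dict]]:
--     """Organize frames by shooting phase"""
--     phase_frames = {
--         'Setup': [],
--         'Loading': [],
--         'Rising': [],
--         'Release': [],
--         'Follow-through': [],
--         'General': []
--     }
--
--     for frame in frames:
--         phase = frame.get('phase', 'General')
--         if phase in phase_frames:
--             phase_frames[phase].append(frame)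
--         else:
--             phase_frames['General'].append(frame)
--
--     return phase_frames
-- ===== SOURCE B (Python) =====
-- from typing import Dict, List
--
-- def _organize_frames_by_phase(frames: List[Dict]) -> Dict[str, List[Dict]]:
--     """Organize frames by shooting phase (per-phase filtering)."""
--     named = ('Setup', 'Loading', 'Rising', 'Release', 'Follow-through')
--     result = {p: [f for f in frames if f.get('phase') == p] for p in named}
--     result['General'] = [f for f in frames if f.get('phase', 'General') not in named]
--     return result
-- ===== Notes on version B (the rewrite author's own statement) =====
-- stated objective: alternative
-- what changed: Replaces the single bucketing pass that mutates a pre-built six-key dict with a dict comprehension doing one equality-filter scan per named phase plus a not-in filter for the General bucket.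
import Mathlib
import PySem

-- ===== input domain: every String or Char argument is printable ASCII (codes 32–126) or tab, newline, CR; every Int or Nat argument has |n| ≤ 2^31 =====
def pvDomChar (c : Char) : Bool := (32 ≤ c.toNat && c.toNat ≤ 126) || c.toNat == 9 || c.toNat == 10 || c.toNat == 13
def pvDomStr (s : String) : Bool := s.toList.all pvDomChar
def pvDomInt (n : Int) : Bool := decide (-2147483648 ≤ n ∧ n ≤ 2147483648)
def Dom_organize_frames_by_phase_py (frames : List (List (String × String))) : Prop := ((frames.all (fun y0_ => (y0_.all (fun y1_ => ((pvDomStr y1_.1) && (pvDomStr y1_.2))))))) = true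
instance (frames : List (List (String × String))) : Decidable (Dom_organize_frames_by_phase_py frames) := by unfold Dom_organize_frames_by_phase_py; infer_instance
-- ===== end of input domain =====

-- B replaces A's single bucketing pass over a pre-built six-key dict with one filter scan per phase (alternative decomposition, same cost).
-- ===== PORT A =====
-- the loop state: a dict with the six literal buckets; each frame is appended to its phase's bucket
def pvStepA (d : PySem.Dict String (List (List (String × String)))) (frame : List (String × String)) :
    PySem.Dict String (List (List (String × String))) :=
  let phase := (PySem.Dict.mk frame).getD "phase" "General"
  if d.contains phase then d.modify phase [] (fun l => l ++ [frame])
  else d.modify "General" [] (fun l => l ++ [frame])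

def organize_frames_by_phase_py (frames : List (List (String × String))) : List (String × List (List (String × String))) :=
  (frames.foldl pvStepA
    (PySem.Dict.mk [("Setup", []), ("Loading", []), ("Rising", []), ("Release", []),
                    ("Follow-through", []), ("General", [])])).items

-- ===== PORT B =====
def pvNamed : List String := ["Setup", "Loading", "Rising", "Release", "Follow-through"]

def organize_frames_by_phase_py_alt (frames : List (List (String × String))) : List (String × List (List (String × String))) :=
  (pvNamed.map (fun p => (p, frames.filter (fun f => (PySem.Dict.mk f).get? "phase" == some p))))
    ++ [("General", frames.filter (fun f => !(pvNamed.contains ((PySem.Dict.mk f).getD "phase" "General"))))]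

-- ===== PRECONDITION & SPEC =====
def Spec_organize_frames_by_phase_py (frames : List (List (String × String))) (out : List (String × List (List (String × String)))) : Prop := out = organize_frames_by_phase_py_alt frames
instance (frames : List (List (String × String))) (out : List (String × List (List (String × String)))) : Decidable (Spec_organize_frames_by_phase_py frames out) := by unfold Spec_organize_frames_by_phase_py; infer_instance

-- ===== CLAIM (what is proved, stated in full; the proofs are below) =====
def Claim_equal_organize_frames_by_phase_py : Prop := ∀ (frames : List (List (String × String))), Dom_organize_frames_by_phase_py frames → Spec_organize_frames_by_phase_py frames (organize_frames_by_phase_py frames)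

-- ===== LEMMAS AND PROOFS =====

-- abbreviation for the phase a frame reports
def pvPh (f : List (String × String)) : String := (PySem.Dict.mk f).getD "phase" "General"

-- filter predicate for a named phase
def pvIs (p : String) (f : List (String × String)) : Bool := (PySem.Dict.mk f).get? "phase" == some p

-- filter predicate for the General bucket
def pvGen (f : List (String × String)) : Bool := !(pvNamed.contains ((PySem.Dict.mk f).getD "phase" "General"))

lemma pvIs_of_ph (f : List (String × String)) (p : String) (hp : p ≠ "General") (h : pvPh f = p) :
    pvIs p f = true := by
  unfold pvPh at h
  unfold pvIs
  rw [PySem.Dict.getD_eq_get?_getD] at h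
  cases hg : (PySem.Dict.mk f).get? "phase" with
  | none => rw [hg] at h; simp at h; exact absurd h.symm hp
  | some q => rw [hg] at h; simp at h; simp [h]

lemma pvIs_false_of_ph_ne (f : List (String × String)) (p : String) (h : pvPh f ≠ p) :
    pvIs p f = false := by
  unfold pvPh at h
  unfold pvIs
  rw [PySem.Dict.getD_eq_get?_getD] at h
  cases hg : (PySem.Dict.mk f).get? "phase" with
  | none => simp
  | some q => rw [hg] at h; simp at h; simp [h]

lemma pvGen_iff (f : List (String × String)) :
    pvGen f = !(pvNamed.contains (pvPh f)) := rfl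

-- loop invariant: folding A's step over frames from literal buckets appends each filter
lemma pvFold_inv (frames : List (List (String × String)))
    (s l r re ft g : List (List (String × String))) :
    (frames.foldl pvStepA
      (PySem.Dict.mk [("Setup", s), ("Loading", l), ("Rising", r), ("Release", re),
                      ("Follow-through", ft), ("General", g)])).items =
    [("Setup", s ++ frames.filter (pvIs "Setup")),
     ("Loading", l ++ frames.filter (pvIs "Loading")),
     ("Rising", r ++ frames.filter (pvIs "Rising")),
     ("Release", re ++ frames.filter (pvIs "Release")),
     ("Follow-through", ft ++ frames.filter (pvIs "Follow-through")),
     ("General", g ++ frames.filter pvGen)] := by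
  induction frames generalizing s l r re ft g with
  | nil => simp [PySem.Dict.items]
  | cons f fs ih =>
    rw [List.foldl_cons]
    have hstep : ∀ p, pvPh f = p →
        pvStepA (PySem.Dict.mk [("Setup", s), ("Loading", l), ("Rising", r), ("Release", re),
                      ("Follow-through", ft), ("General", g)]) f =
        (if p = "Setup" then (PySem.Dict.mk [("Setup", s ++ [f]), ("Loading", l), ("Rising", r), ("Release", re), ("Follow-through", ft), ("General", g)])
         else if p = "Loading" then (PySem.Dict.mk [("Setup", s), ("Loading", l ++ [f]), ("Rising", r), ("Release", re), ("Follow-through", ft), ("General", g)])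
         else if p = "Rising" then (PySem.Dict.mk [("Setup", s), ("Loading", l), ("Rising", r ++ [f]), ("Release", re), ("Follow-through", ft), ("General", g)])
         else if p = "Release" then (PySem.Dict.mk [("Setup", s), ("Loading", l), ("Rising", r), ("Release", re ++ [f]), ("Follow-through", ft), ("General", g)])
         else if p = "Follow-through" then (PySem.Dict.mk [("Setup", s), ("Loading", l), ("Rising", r), ("Release", re), ("Follow-through", ft ++ [f]), ("General", g)])
         else (PySem.Dict.mk [("Setup", s), ("Loading", l), ("Rising", r), ("Release", re), ("Follow-through", ft), ("General", g ++ [f])])) := by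
      intro p hp
      unfold pvStepA
      show (if _ then _ else _) = _
      rw [show (PySem.Dict.mk f).getD "phase" "General" = p from hp]
      by_cases h1 : p = "Setup"
      · subst h1; simp [PySem.Dict.contains, PySem.Dict.modify, PySem.Dict.insert, PySem.Dict.getD, PySem.Dict.get?, PySem.Dict.keys]
      · by_cases h2 : p = "Loading"
        · subst h2; simp [PySem.Dict.contains, PySem.Dict.modify, PySem.Dict.insert, PySem.Dict.getD, PySem.Dict.get?, PySem.Dict.keys]
        · by_cases h3 : p = "Rising"
          · subst h3; simp [PySem.Dict.contains, PySem.Dict.modify, PySem.Dict.insert, PySem.Dict.getD, PySem.Dict.get?, PySem.Dict.keys]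
          · by_cases h4 : p = "Release"
            · subst h4; simp [PySem.Dict.contains, PySem.Dict.modify, PySem.Dict.insert, PySem.Dict.getD, PySem.Dict.get?, PySem.Dict.keys]
            · by_cases h5 : p = "Follow-through"
              · subst h5; simp [PySem.Dict.contains, PySem.Dict.modify, PySem.Dict.insert, PySem.Dict.getD, PySem.Dict.get?, PySem.Dict.keys]
              · by_cases h6 : p = "General"
                · subst h6; simp [PySem.Dict.contains, PySem.Dict.modify, PySem.Dict.insert, PySem.Dict.getD, PySem.Dict.get?, PySem.Dict.keys]
                · simp [PySem.Dict.contains, PySem.Dict.modify, PySem.Dict.insert, PySem.Dict.getD, PySem.Dict.get?, PySem.Dict.keys, PySem.Dict.items, h1, h2, h3, h4, h5, h6,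
                    show ¬("Setup" = p) from fun h => h1 h.symm, show ¬("Loading" = p) from fun h => h2 h.symm,
                    show ¬("Rising" = p) from fun h => h3 h.symm, show ¬("Release" = p) from fun h => h4 h.symm,
                    show ¬("Follow-through" = p) from fun h => h5 h.symm, show ¬("General" = p) from fun h => h6 h.symm]
    rw [hstep (pvPh f) rfl]
    by_cases h1 : pvPh f = "Setup"
    · rw [if_pos h1, ih]
      have := pvIs_of_ph f "Setup" (by decide) h1
      simp [this,
        pvIs_false_of_ph_ne f "Loading" (by rw [h1]; decide),
        pvIs_false_of_ph_ne f "Rising" (by rw [h1]; decide),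
        pvIs_false_of_ph_ne f "Release" (by rw [h1]; decide),
        pvIs_false_of_ph_ne f "Follow-through" (by rw [h1]; decide),
        show pvGen f = false by rw [pvGen_iff, h1]; decide]
    · rw [if_neg h1]
      by_cases h2 : pvPh f = "Loading"
      · rw [if_pos h2, ih]
        simp [pvIs_of_ph f "Loading" (by decide) h2,
          pvIs_false_of_ph_ne f "Setup" (by rw [h2]; decide),
          pvIs_false_of_ph_ne f "Rising" (by rw [h2]; decide),
          pvIs_false_of_ph_ne f "Release" (by rw [h2]; decide),
          pvIs_false_of_ph_ne f "Follow-through" (by rw [h2]; decide),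
          show pvGen f = false by rw [pvGen_iff, h2]; decide]
      · rw [if_neg h2]
        by_cases h3 : pvPh f = "Rising"
        · rw [if_pos h3, ih]
          simp [pvIs_of_ph f "Rising" (by decide) h3,
            pvIs_false_of_ph_ne f "Setup" (by rw [h3]; decide),
            pvIs_false_of_ph_ne f "Loading" (by rw [h3]; decide),
            pvIs_false_of_ph_ne f "Release" (by rw [h3]; decide),
            pvIs_false_of_ph_ne f "Follow-through" (by rw [h3]; decide),
            show pvGen f = false by rw [pvGen_iff, h3]; decide]
        · rw [if_neg h3]
          by_cases h4 : pvPh f = "Release"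
          · rw [if_pos h4, ih]
            simp [pvIs_of_ph f "Release" (by decide) h4,
              pvIs_false_of_ph_ne f "Setup" (by rw [h4]; decide),
              pvIs_false_of_ph_ne f "Loading" (by rw [h4]; decide),
              pvIs_false_of_ph_ne f "Rising" (by rw [h4]; decide),
              pvIs_false_of_ph_ne f "Follow-through" (by rw [h4]; decide),
              show pvGen f = false by rw [pvGen_iff, h4]; decide]
          · rw [if_neg h4]
            by_cases h5 : pvPh f = "Follow-through"
            · rw [if_pos h5, ih]
              simp [pvIs_of_ph f "Follow-through" (by decide) h5,
                pvIs_false_of_ph_ne f "Setup" (by rw [h5]; decide),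
                pvIs_false_of_ph_ne f "Loading" (by rw [h5]; decide),
                pvIs_false_of_ph_ne f "Rising" (by rw [h5]; decide),
                pvIs_false_of_ph_ne f "Release" (by rw [h5]; decide),
                show pvGen f = false by rw [pvGen_iff, h5]; decide]
            · rw [if_neg h5, ih]
              have hgen : pvGen f = true := by
                rw [pvGen_iff]
                simp [pvNamed, h1, h2, h3, h4, h5]
              simp [hgen,
                pvIs_false_of_ph_ne f "Setup" h1,
                pvIs_false_of_ph_ne f "Loading" h2,
                pvIs_false_of_ph_ne f "Rising" h3,
                pvIs_false_of_ph_ne f "Release" h4,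
                pvIs_false_of_ph_ne f "Follow-through" h5]

-- ===== VERDICT (by name: the statement is the Claim_ definition above) =====
theorem organize_frames_by_phase_py_spec : Claim_equal_organize_frames_by_phase_py := by
  intro frames _
  show organize_frames_by_phase_py frames = organize_frames_by_phase_py_alt frames
  unfold organize_frames_by_phase_py organize_frames_by_phase_py_alt
  rw [pvFold_inv]
  rfl
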